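-- pv_equiv track=rewrite | github.com/hrishikeshtak/Coding_Practises_Solutions | hackerrank/si/contest_3/si-matrix-flips.py | matrix_flips
-- ===== SOURCE A (Python) =====
-- def matrix_flips(arr, R, C):
--     ans = 0
--     no_of_shifts = 0
--
--     for i in range(R-1, -1, -1):
--         for j in range(C-1, -1, -1):
--             if (int(arr[i][j]) + no_of_shifts) % 2 == 0:
--                 ans += 1
--                 no_of_shifts += 1
--     return ans
-- ===== SOURCE B (Python) =====
-- def matrix_flips(arr, R, C):
--     # run-structure formulation: flatten parities in the same reverse order,
--     # count maximal runs of equal parity via adjacent mismatches, and adjust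
--     # by one when the first run has odd parity
--     if R <= 0 or C <= 0:
--         return 0
--     ps = [int(x) % 2 for row in reversed(arr[:R]) for x in reversed(row[:C])]
--     if not ps:
--         return 0
--     runs = 1 + sum(1 for a, b in zip(ps, ps[1:]) if a != b)
--     return runs - 1 if ps[0] == 1 else runs
-- ===== Notes on version B (the rewrite author's own statement) =====
-- stated objective: alternative
-- what changed: B replaces the stateful shift-counter simulation by a staged computation: it slices and reverses the matrix to flatten cell parities, counts parity runs as adjacent mismatches in a zip, and derives the answer by a closed adjustment (minus one when the first run is odd).
import Mathlib
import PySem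

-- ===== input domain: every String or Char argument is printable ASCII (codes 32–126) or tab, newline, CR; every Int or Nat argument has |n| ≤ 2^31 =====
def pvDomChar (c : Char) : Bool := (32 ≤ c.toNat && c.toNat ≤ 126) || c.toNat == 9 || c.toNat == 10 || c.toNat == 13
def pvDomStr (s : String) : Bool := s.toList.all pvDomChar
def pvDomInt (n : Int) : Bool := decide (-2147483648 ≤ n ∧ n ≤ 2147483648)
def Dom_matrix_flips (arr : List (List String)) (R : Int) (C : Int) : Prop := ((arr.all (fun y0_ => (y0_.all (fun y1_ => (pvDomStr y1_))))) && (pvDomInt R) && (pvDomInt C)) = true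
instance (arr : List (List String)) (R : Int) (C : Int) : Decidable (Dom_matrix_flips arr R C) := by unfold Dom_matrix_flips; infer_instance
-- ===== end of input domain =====

-- B replaces the stateful shift-counter simulation by a staged run-structure
-- computation (slice/reverse to flatten parities, count adjacent mismatches,
-- closed final adjustment); objective: alternative (same O(R*C) cost).

-- ===== PORT A =====
def matrix_flips (arr : List (List String)) (R : Int) (C : Int) : Int :=
  (((PySem.List.pyRange (R - 1) (-1) (-1)).foldl (fun (st : Int × Int) i =>
      (PySem.List.pyRange (C - 1) (-1) (-1)).foldl (fun (st : Int × Int) j =>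
        if PySem.Int.mod
            ((PySem.Int.ofStr? (PySem.List.pyGetD (PySem.List.pyGetD arr i []) j "")).getD 0
              + st.2) 2 = 0
        then (st.1 + 1, st.2 + 1) else st) st) ((0 : Int), (0 : Int))).1)

-- ===== PORT B =====
def matrix_flips_alt (arr : List (List String)) (R : Int) (C : Int) : Int :=
  if R ≤ 0 ∨ C ≤ 0 then 0
  else
    let ps : List Int := ((arr.take R.toNat).reverse).flatMap (fun row =>
        ((row.take C.toNat).reverse).map (fun x =>
          PySem.Int.mod ((PySem.Int.ofStr? x).getD 0) 2))
    match ps with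
    | [] => 0
    | p :: _ =>
      let runs : Int := 1 + ((ps.zip ps.tail).filter (fun ab => ab.1 ≠ ab.2)).length
      if p = 1 then runs - 1 else runs

-- ===== PRECONDITION & SPEC =====
-- Pre_ excludes exactly the inputs on which the Python raises: an index i < R (resp. j < C,
-- reached for that i) out of range (IndexError) or a visited cell that int() rejects (ValueError).
def Pre_matrix_flips (arr : List (List String)) (R : Int) (C : Int) : Prop :=
  R ≤ 0 ∨ C ≤ 0 ∨
    (R ≤ (arr.length : Int) ∧ ∀ row ∈ arr.take R.toNat,
      C ≤ (row.length : Int) ∧ ∀ x ∈ row.take C.toNat, PySem.Int.ofStr? x ≠ none)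
instance (arr : List (List String)) (R : Int) (C : Int) : Decidable (Pre_matrix_flips arr R C) := by
  unfold Pre_matrix_flips; infer_instance

def pvWitness_matrix_flips : List (List String) × Int × Int := ([["1", "2"], ["3", "4"]], 2, 2)

def Spec_matrix_flips (arr : List (List String)) (R : Int) (C : Int) (out : Int) : Prop := out = matrix_flips_alt arr R C
instance (arr : List (List String)) (R : Int) (C : Int) (out : Int) : Decidable (Spec_matrix_flips arr R C out) := by unfold Spec_matrix_flips; infer_instance

-- ===== CLAIM (what is proved, stated in full; the proofs are below) =====
def Claim_equal_matrix_flips : Prop := ∀ (arr : List (List String)) (R : Int) (C : Int), Dom_matrix_flips arr R C → Pre_matrix_flips arr R C → Spec_matrix_flips arr R C (matrix_flips arr R C)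

-- ===== LEMMAS AND PROOFS =====

/-- the (total) integer value A reads from cell (i, j) -/
def cellV (arr : List (List String)) (i j : Int) : Int :=
  (PySem.Int.ofStr? (PySem.List.pyGetD (PySem.List.pyGetD arr i []) j "")).getD 0

/-- parity of a cell string, as B computes it -/
def parS (x : String) : Int := PySem.Int.mod ((PySem.Int.ofStr? x).getD 0) 2

/-- A's loop body, on the cell value -/
def stepV (st : Int × Int) (v : Int) : Int × Int :=
  if PySem.Int.mod (v + st.2) 2 = 0 then (st.1 + 1, st.2 + 1) else st

/-- A's loop body, on the cell parity (Lean `%` = Python `%` for divisor 2) -/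
def stepP (st : Int × Int) (p : Int) : Int × Int :=
  if (p + st.2) % 2 = 0 then (st.1 + 1, st.2 + 1) else st

/-- recursive form of A's count, shift counter `s` -/
def countA (s : Int) : List Int → Int
  | [] => 0
  | p :: l => if (p + s) % 2 = 0 then 1 + countA (s + 1) l else countA s l

def runsAux (prev : Int) : List Int → Int
  | [] => 0
  | p :: l => (if p = prev then 0 else 1) + runsAux p l

def runsL : List Int → Int
  | [] => 0
  | p :: l => 1 + runsAux p l

theorem pymod2 (a : Int) : PySem.Int.mod a 2 = a % 2 :=
  PySem.Int.mod_eq_emod_of_pos (by norm_num)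

theorem flatMap_congr_mem {α β : Type} {l : List α} {f g : α → List β}
    (h : ∀ x ∈ l, f x = g x) : l.flatMap f = l.flatMap g := by
  induction l with
  | nil => rfl
  | cons a l ih =>
    simp [List.flatMap_cons, h a List.mem_cons_self,
      ih (fun x hx => h x (List.mem_cons_of_mem _ hx))]

theorem foldl_flatMap {α β σ : Type} (l : List α) (f : α → List β) (g : σ → β → σ)
    (init : σ) : (l.flatMap f).foldl g init = l.foldl (fun s a => (f a).foldl g s) init := by
  induction l generalizing init with
  | nil => rfl
  | cons a l ih => simp [List.flatMap_cons, List.foldl_append, ih]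

theorem runsAux_eq (p : Int) (l : List Int) :
    runsAux p l = runsL l - (if l.head? = some p then 1 else 0) := by
  cases l with
  | nil => simp [runsAux, runsL]
  | cons q l' =>
    simp only [runsAux, runsL, List.head?_cons]
    by_cases h : q = p <;> simp [h]

theorem countA_eq_runs (l : List Int) (s : Int) (h : ∀ p ∈ l, p = 0 ∨ p = 1) :
    countA s l = runsL l - (if l.head? = some (1 - s % 2) then 1 else 0) := by
  induction l generalizing s with
  | nil => simp [countA, runsL]
  | cons p l ih =>
    have hp : p = 0 ∨ p = 1 := h p (List.mem_cons_self)
    have hl : ∀ q ∈ l, q = 0 ∨ q = 1 := fun q hq => h q (List.mem_cons_of_mem _ hq)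
    simp only [countA, runsL, List.head?_cons]
    by_cases hc : (p + s) % 2 = 0
    · rw [if_pos hc, ih _ hl]
      have h1 : (1 - (s + 1) % 2 : Int) = p := by rcases hp with h' | h' <;> omega
      have h2 : ¬ (p = 1 - s % 2) := by rcases hp with h' | h' <;> omega
      rw [h1, ← runsAux_eq, if_neg (by simp [h2])]
      ring
    · rw [if_neg hc, ih _ hl]
      have h1 : p = 1 - s % 2 := by rcases hp with h' | h' <;> omega
      rw [← h1, ← runsAux_eq, if_pos (by simp [h1])]
      ring

theorem foldlP_eq_countA (l : List Int) (a : Int) :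
    (l.foldl stepP (a, a)).1 = a + countA a l := by
  induction l generalizing a with
  | nil => simp [countA]
  | cons p l ih =>
    simp only [List.foldl_cons, countA, stepP]
    by_cases hc : (p + a) % 2 = 0
    · rw [if_pos hc, if_pos hc]; simp only [ih]; ring
    · rw [if_neg hc, if_neg hc, ih]

/-- B's mismatch count over adjacent pairs is `runsAux` -/
theorem zip_count_eq_runsAux (p : Int) (t : List Int) :
    ((((p :: t).zip t).filter (fun ab => ab.1 ≠ ab.2)).length : Int) = runsAux p t := by
  induction t generalizing p with
  | nil => simp [runsAux]
  | cons q t ih =>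
    have hif : ((p :: q :: t).zip (q :: t)).filter (fun ab => ab.1 ≠ ab.2)
        = (if p = q then [] else [(p, q)])
            ++ ((q :: t).zip t).filter (fun ab => ab.1 ≠ ab.2) := by
      simp only [List.zip_cons_cons, List.filter_cons]
      by_cases h : p = q <;> simp [h]
    rw [hif]
    simp only [runsAux, List.length_append, ← ih q]
    by_cases h : p = q
    · simp [h]
    · have h' : ¬ q = p := fun e => h e.symm
      simp only [if_neg h, if_neg h', List.length_cons, List.length_nil]
      push_cast; ring

/-- the parity list of A's traversal -/
def psOf (arr : List (List String)) (R C : Int) : List Int :=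
  (PySem.List.pyRange (R - 1) (-1) (-1)).flatMap (fun i =>
    (PySem.List.pyRange (C - 1) (-1) (-1)).map (fun j => cellV arr i j % 2))

theorem psOf_mem (arr : List (List String)) (R C : Int) :
    ∀ p ∈ psOf arr R C, p = 0 ∨ p = 1 := by
  intro p hp
  simp only [psOf, List.mem_flatMap, List.mem_map] at hp
  obtain ⟨i, _, j, _, rfl⟩ := hp
  omega

theorem matrix_flips_eq_countA (arr : List (List String)) (R C : Int) :
    matrix_flips arr R C = countA 0 (psOf arr R C) := by
  have hstep : ∀ (st : Int × Int) (v : Int), stepV st v = stepP st (v % 2) := by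
    intro st v
    simp only [stepV, stepP, pymod2]
    by_cases hc : (v + st.2) % 2 = 0
    · rw [if_pos hc, if_pos (by omega)]
    · rw [if_neg hc, if_neg (by omega)]
  have h1 : matrix_flips arr R C =
      (((PySem.List.pyRange (R - 1) (-1) (-1)).flatMap (fun i =>
          (PySem.List.pyRange (C - 1) (-1) (-1)).map (fun j => cellV arr i j))).foldl
        stepV ((0 : Int), (0 : Int))).1 := by
    rw [foldl_flatMap]
    simp only [matrix_flips, stepV, cellV, pymod2, List.foldl_map]
  rw [h1]
  have hmap : (psOf arr R C) =
      ((PySem.List.pyRange (R - 1) (-1) (-1)).flatMap (fun i =>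
        (PySem.List.pyRange (C - 1) (-1) (-1)).map (fun j => cellV arr i j))).map (· % 2) := by
    simp [psOf, List.map_flatMap, Function.comp_def]
  have h2 : ((PySem.List.pyRange (R - 1) (-1) (-1)).flatMap (fun i =>
        (PySem.List.pyRange (C - 1) (-1) (-1)).map (fun j => cellV arr i j))).foldl
        stepV ((0 : Int), (0 : Int)) = (psOf arr R C).foldl stepP ((0 : Int), (0 : Int)) := by
    rw [hmap, List.foldl_map]
    exact List.foldl_ext _ _ _ (fun a b _ => hstep a b)
  rw [h2, foldlP_eq_countA]
  ring

/-- reversed-countdown map over pyGetD equals reverse of a take -/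
theorem revRange_map_getD {α : Type} (l : List α) (d : α) (n : Int)
    (h0 : 0 ≤ n) (hn : n ≤ l.length) :
    (PySem.List.pyRange (n - 1) (-1) (-1)).map (fun i => PySem.List.pyGetD l i d)
      = (l.take n.toNat).reverse := by
  have h1 : PySem.List.pyRange (n - 1) (-1) (-1)
      = (PySem.List.pyRange 0 n 1).reverse := by
    have h := PySem.List.pyRange_neg_one_eq_reverse (n - 1) (-1)
    simpa using h
  rw [h1, List.map_reverse]
  congr 1
  rw [PySem.List.pyRange_one]
  apply List.ext_getElem
  · simp; omega
  · intro k hk1 hk2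
    have hkn : k < n.toNat := by simpa using hk1
    have hkl : k < l.length := by omega
    simp [List.getD_eq_getElem, hkl]

/-- B's parity list equals A's parity list, under the in-range facts Pre_ gives -/
theorem psB_eq_psOf (arr : List (List String)) (R C : Int)
    (hR : 1 ≤ R) (hC : 1 ≤ C)
    (hlen : R ≤ arr.length)
    (hrow : ∀ row ∈ arr.take R.toNat, C ≤ row.length) :
    ((arr.take R.toNat).reverse).flatMap (fun row =>
        ((row.take C.toNat).reverse).map parS) = psOf arr R C := by
  rw [← revRange_map_getD arr ([] : List String) R (by omega) hlen, List.flatMap_map]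
  apply flatMap_congr_mem
  intro i hi
  rw [PySem.List.mem_pyRange_neg_one] at hi
  have h0i : 0 ≤ i := by omega
  have hil : i.toNat < arr.length := by omega
  have hrowmem : PySem.List.pyGetD arr i [] ∈ arr.take R.toNat := by
    rw [PySem.List.pyGetD_eq_getElem (xs := arr) (i := i) (d := []) h0i (by push_cast; omega)]
    have hkt : i.toNat < (arr.take R.toNat).length := by simp [List.length_take]; omega
    have : (arr.take R.toNat)[i.toNat] = arr[i.toNat] := List.getElem_take
    rw [← this]
    exact List.getElem_mem hkt
  have hCrow : C ≤ ((PySem.List.pyGetD arr i []).length : Int) :=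
    hrow _ hrowmem
  rw [← revRange_map_getD (PySem.List.pyGetD arr i []) "" C (by omega) hCrow, List.map_map]
  simp [cellV, parS, pymod2, Function.comp_def]

/-- B's value, in run-count form, when the guard does not fire -/
theorem alt_eq_runs (arr : List (List String)) (R C : Int) (h : ¬ (R ≤ 0 ∨ C ≤ 0)) :
    matrix_flips_alt arr R C =
      runsL (((arr.take R.toNat).reverse).flatMap (fun row =>
          ((row.take C.toNat).reverse).map parS))
        - (if (((arr.take R.toNat).reverse).flatMap (fun row =>
            ((row.take C.toNat).reverse).map parS)).head? = some 1 then 1 else 0) := by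
  unfold matrix_flips_alt
  rw [if_neg h]
  have hps : ((arr.take R.toNat).reverse).flatMap (fun row =>
      ((row.take C.toNat).reverse).map (fun x =>
        PySem.Int.mod ((PySem.Int.ofStr? x).getD 0) 2))
      = ((arr.take R.toNat).reverse).flatMap (fun row =>
          ((row.take C.toNat).reverse).map parS) := rfl
  rw [hps]
  cases hl : ((arr.take R.toNat).reverse).flatMap (fun row =>
      ((row.take C.toNat).reverse).map parS) with
  | nil => simp [runsL]
  | cons p t =>
    simp only [List.tail_cons, List.head?_cons, runsL]
    have hz := zip_count_eq_runsAux p t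
    by_cases hp : p = 1
    · rw [if_pos hp, if_pos (by rw [hp])]
      omega
    · rw [if_neg hp, if_neg (by simpa using hp)]
      omega

-- ===== VERDICT (by name: the statement is the Claim_ definition above) =====
theorem matrix_flips_spec : Claim_equal_matrix_flips := by
  intro arr R C _ hpre
  unfold Spec_matrix_flips
  rw [matrix_flips_eq_countA]
  by_cases hRC : R ≤ 0 ∨ C ≤ 0
  · have hps : psOf arr R C = [] := by
      rcases hRC with h | h
      · have he : PySem.List.pyRange (R - 1) (-1) (-1) = [] :=
          PySem.List.pyRange_neg_one_eq_nil (by omega)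
        simp [psOf, he]
      · have he : PySem.List.pyRange (C - 1) (-1) (-1) = [] :=
          PySem.List.pyRange_neg_one_eq_nil (by omega)
        simp [psOf, he]
    rw [hps]
    unfold matrix_flips_alt
    rw [if_pos hRC]
    simp [countA]
  · have hR : 1 ≤ R := by omega
    have hC : 1 ≤ C := by omega
    rcases hpre with h | h | ⟨hlen, hall⟩
    · omega
    · omega
    have hrow : ∀ row ∈ arr.take R.toNat, C ≤ (row.length : Int) :=
      fun row hm => (hall row hm).1
    rw [← psB_eq_psOf arr R C hR hC hlen hrow, alt_eq_runs arr R C hRC,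
      countA_eq_runs _ _ (by rw [psB_eq_psOf arr R C hR hC hlen hrow]; exact psOf_mem arr R C)]
    norm_num
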